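-- pv_equiv track=rewrite | github.com/Rescyy/LFAF | sourcecode/chomsky.py | truth_list
-- ===== SOURCE A (Python) =====
-- def truth_list(a: int):
--     if a == 1:
--         return [[0]]
--     b = a**2
--     c = 0
--     truth_list = []
--     for _ in range(b-1):
--         str = bin(c)[2:]
--         truth_list.append([int(i) for i in list('0'*(a-len(str)) + str)])
--         c += 1
--     return truth_list
-- ===== SOURCE B (Python) =====
-- def truth_list(a: int):
--     if a == 1:
--         return [[0]]
--     row = [0] * max(a, 1)
--     rows = []
--     for _ in range(a * a - 1):
--         rows.append(row.copy())
--         # increment row as a binary counter, walking from the last digit leftward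
--         i = len(row) - 1
--         while i >= 0 and row[i] == 1:
--             row[i] = 0
--             i -= 1
--         if i >= 0:
--             row[i] = 1
--         else:
--             row.insert(0, 1)  # counter outgrew its width: new leading digit
--     return rows
-- ===== Notes on version B (the rewrite author's own statement) =====
-- stated objective: alternative
-- what changed: B threads an in-place binary-counter row across iterations (append a copy, then increment by walking from the last digit leftward with carry, growing a leading digit on overflow) instead of independently formatting each counter value with bin() and string padding.
import Mathlib
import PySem

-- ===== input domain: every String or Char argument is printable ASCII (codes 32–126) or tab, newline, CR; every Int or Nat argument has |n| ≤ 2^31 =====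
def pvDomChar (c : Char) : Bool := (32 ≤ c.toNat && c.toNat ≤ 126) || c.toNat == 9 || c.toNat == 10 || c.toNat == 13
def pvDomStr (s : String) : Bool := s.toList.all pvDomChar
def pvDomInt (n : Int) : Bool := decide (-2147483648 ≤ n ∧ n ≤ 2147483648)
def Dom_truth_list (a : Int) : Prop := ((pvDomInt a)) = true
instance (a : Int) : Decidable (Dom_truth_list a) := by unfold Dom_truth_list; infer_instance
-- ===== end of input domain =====

-- B replaces per-iteration bin()/string padding by an in-place binary-counter increment
-- threaded across iterations (objective: alternative decomposition, same cost class).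

-- ===== PORT A =====
-- one loop-body row: str = bin(c)[2:]; [int(i) for i in list('0'*(a-len(str)) + str)]
-- int(i) is ported as (PySem.Int.ofChars? [i]).getD 0 — exact here: i is always a digit
-- char '0'/'1', on which ofChars? is never none.
def rowA (a : Int) (c : Int) : List Int :=
  let s := PySem.List.slice (PySem.Int.toBinChars0b c) (some 2) none
  (PySem.List.pyRepeat ['0'] (a - (s.length : Int)) ++ s).map
    (fun i => (PySem.Int.ofChars? [i]).getD 0)

def truth_list (a : Int) : List (List Int) :=
  if a = 1 then [[0]] else
    let b := a ^ 2
    ((PySem.List.pyRange 0 (b - 1) 1).foldl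
      (fun (st : Int × List (List Int)) _ => (st.1 + 1, st.2 ++ [rowA a st.1]))
      ((0 : Int), ([] : List (List Int)))).2

-- ===== PORT B =====
-- the while loop walks from the last index leftward, zeroing 1s and carrying:
-- recursion over the reversed row; [] means the index walked below 0, so the
-- counter grows a new leading 1 (row.insert(0, 1)).
def incRev : List Int → List Int
  | [] => [1]
  | d :: rest => if d = 1 then 0 :: incRev rest else 1 :: rest

def incRow (row : List Int) : List Int := (incRev row.reverse).reverse

def truth_list_alt (a : Int) : List (List Int) :=
  if a = 1 then [[0]] else
    ((List.range (a * a - 1).toNat).foldl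
      (fun (st : List Int × List (List Int)) _ => (incRow st.1, st.2 ++ [st.1]))
      (List.replicate (max a 1).toNat (0 : Int), ([] : List (List Int)))).2

-- ===== PRECONDITION & SPEC =====
def Spec_truth_list (a : Int) (out : List (List Int)) : Prop := out = truth_list_alt a
instance (a : Int) (out : List (List Int)) : Decidable (Spec_truth_list a out) := by unfold Spec_truth_list; infer_instance

-- ===== CLAIM (what is proved, stated in full; the proofs are below) =====
def Claim_equal_truth_list : Prop := ∀ (a : Int), Dom_truth_list a → Spec_truth_list a (truth_list a)

-- ===== LEMMAS AND PROOFS =====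

-- binary digits of n, least-significant first ([] for 0)
def Lb (n : Nat) : List Int :=
  if h : n = 0 then [] else ((n % 2 : Nat) : Int) :: Lb (n / 2)
  decreasing_by exact Nat.div_lt_self (Nat.pos_of_ne_zero h) one_lt_two

-- same, but 0 rendered as the single digit 0 (as bin(0)[2:] = '0')
def Lb' (n : Nat) : List Int := if n = 0 then [0] else Lb n

theorem Lb_cons (m : Nat) (hm : m ≠ 0) : Lb m = ((m % 2 : Nat) : Int) :: Lb (m / 2) := by
  rw [Lb]; simp [hm]

theorem Lb'_of_ne (m : Nat) (hm : m ≠ 0) : Lb' m = Lb m := if_neg hm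

theorem Lb_len_mono (n : Nat) : (Lb' n).length ≤ (Lb' (n + 1)).length := by
  induction n using Nat.strong_induction_on with
  | _ n ih =>
    by_cases h0 : n = 0
    · subst h0; simp [Lb', Lb]
    · rw [Lb'_of_ne n h0, Lb'_of_ne (n + 1) (by omega), Lb_cons n h0, Lb_cons (n + 1) (by omega)]
      simp only [List.length_cons, Nat.add_le_add_iff_right]
      rcases Nat.mod_two_eq_zero_or_one n with hp | hp
      · have h12 : (n + 1) / 2 = n / 2 := by omega
        rw [h12]
      · have h12 : (n + 1) / 2 = n / 2 + 1 := by omega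
        rw [h12]
        by_cases hh : n / 2 = 0
        · rw [hh, Lb]; simp
        · have := ih (n / 2) (by omega)
          rwa [Lb'_of_ne _ hh, Lb'_of_ne _ (by omega)] at this

theorem incRev_zeros (k : Nat) :
    incRev (List.replicate k 0) = 1 :: List.replicate (k - 1) 0 := by
  cases k with
  | zero => simp [incRev]
  | succ k => simp [List.replicate_succ, incRev]

theorem incRev_step (n : Nat) : ∀ (k : Nat),
    incRev (Lb' n ++ List.replicate k 0)
      = Lb' (n + 1) ++ List.replicate (((Lb' n).length + k) - (Lb' (n + 1)).length) 0 := by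
  induction n using Nat.strong_induction_on with
  | _ n ih =>
    intro k
    by_cases h0 : n = 0
    · subst h0
      rw [show Lb' 0 = [0] from rfl, show Lb' 1 = [1] by rw [Lb'_of_ne 1 one_ne_zero, Lb_cons 1 one_ne_zero, Lb]; rfl]
      simp [incRev]
    · rw [Lb'_of_ne n h0, Lb'_of_ne (n + 1) (by omega), Lb_cons n h0, Lb_cons (n + 1) (by omega)]
      rcases Nat.mod_two_eq_zero_or_one n with hp | hp
      · -- even n: head digit is 0
        have h12 : (n + 1) / 2 = n / 2 := by omega
        have h1m : (n + 1) % 2 = 1 := by omega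
        rw [hp, h12, h1m]
        simp [incRev]
      · -- odd n: head digit is 1, carry into the tail
        have h12 : (n + 1) / 2 = n / 2 + 1 := by omega
        have h1m : (n + 1) % 2 = 0 := by omega
        rw [hp, h12, h1m]
        simp only [List.cons_append, incRev, Nat.cast_one, Nat.cast_zero]
        by_cases hh : n / 2 = 0
        · -- n = 1
          rw [hh, Lb, dif_pos rfl, List.nil_append, incRev_zeros,
            Lb_cons 1 one_ne_zero, Lb, dif_pos rfl]
          simp only [List.length_cons, List.length_nil]
          have h11 : 1 % 2 = 1 := rfl
          rw [h11]
          have hc : 0 + 1 + k - (0 + 1 + 1) = k - 1 := by omega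
          simp [hc]
        · have hstep := ih (n / 2) (by omega) k
          rw [Lb'_of_ne _ hh, Lb'_of_ne _ (by omega)] at hstep
          rw [hstep]
          have hc : (1 :: Lb (n / 2)).length + k - (0 :: Lb (n / 2 + 1)).length
              = (Lb (n / 2)).length + k - (Lb (n / 2 + 1)).length := by
            simp only [List.length_cons]; omega
          simp [hc]
          omega

-- binary digit characters of n, most-significant first ('0' for 0): bin(n)[2:]
def Dch (n : Nat) : List Char :=
  if h : n < 2 then [Nat.digitChar n]
  else Dch (n / 2) ++ [Nat.digitChar (n % 2)]
  decreasing_by exact Nat.div_lt_self (by omega) one_lt_two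

theorem digit_map (m : Nat) (hm : m < 2) :
    (PySem.Int.ofChars? [Nat.digitChar m]).getD 0 = (m : Int) := by
  interval_cases m <;> decide

theorem toDigitsCore_eq : ∀ (f n : Nat) (l : List Char), n < f →
    Nat.toDigitsCore 2 f n l = Dch n ++ l := by
  intro f
  induction f with
  | zero => omega
  | succ f ih =>
    intro n l hn
    rw [Nat.toDigitsCore]
    by_cases h2 : n < 2
    · have hz : n / 2 = 0 := by omega
      simp only [hz, if_true]
      rw [Dch]
      simp only [h2, dif_pos]
      have hm : n % 2 = n := by omega
      simp [hm]
    · have hne : n / 2 ≠ 0 := by omega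
      simp only [hne, if_false]
      rw [ih (n / 2) _ (by omega)]
      conv_rhs => rw [Dch]
      simp [h2]

theorem Dch_map (n : Nat) :
    (Dch n).map (fun i => (PySem.Int.ofChars? [i]).getD 0) = (Lb' n).reverse := by
  induction n using Nat.strong_induction_on with
  | _ n ih =>
    by_cases h2 : n < 2
    · rw [Dch]; simp only [h2, dif_pos]
      interval_cases n <;> simp [Lb', Lb] <;> decide
    · rw [Dch]; simp only [h2, dif_neg, not_false_iff]
      rw [List.map_append, ih (n / 2) (by omega)]
      rw [Lb'_of_ne _ (by omega : n / 2 ≠ 0)]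
      rw [Lb'_of_ne n (by omega), Lb_cons n (by omega)]
      simp [digit_map (n % 2) (by omega)]

theorem Lb'_length_pos (n : Nat) : 1 ≤ (Lb' n).length := by
  by_cases h : n = 0
  · subst h; simp [Lb']
  · rw [Lb'_of_ne n h, Lb_cons n h]; simp

theorem Dch_length (n : Nat) : (Dch n).length = (Lb' n).length := by
  have := congrArg List.length (Dch_map n)
  simpa using this

-- the counter row of value c at width w, most-significant first
def repW (w c : Nat) : List Int :=
  (Lb' c ++ List.replicate (w - (Lb' c).length) 0).reverse

theorem incRow_rep (w c : Nat) : incRow (repW w c) = repW w (c + 1) := by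
  unfold incRow repW
  rw [List.reverse_reverse, incRev_step]
  have := Lb_len_mono c
  congr 3
  omega

theorem rep_zero (w : Nat) (hw : 1 ≤ w) : repW w 0 = List.replicate w (0 : Int) := by
  unfold repW
  rw [show Lb' 0 = [0] from rfl]
  rw [show ([(0:Int)] ++ List.replicate (w - [(0:Int)].length) 0) = List.replicate w 0 by
    simp only [List.singleton_append, List.length_cons, List.length_nil]
    rw [show w = (w - 1) + 1 by omega, List.replicate_succ]
    simp]
  simp

theorem rowA_eq (a : Int) (i : Nat) : rowA a (i : Int) = repW (max a 1).toNat i := by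
  unfold rowA
  have hs : PySem.List.slice (PySem.Int.toBinChars0b (i : Int)) (some 2) none = Dch i := by
    rw [show ((2:Int)) = ((2:Nat):Int) by norm_num, PySem.List.slice_from_natCast]
    rw [PySem.Int.toBinChars0b, if_neg (by omega : ¬ (i:Int) < 0)]
    simp only [List.drop_succ_cons, List.drop_zero, Int.toNat_natCast]
    rw [Nat.toDigits, toDigitsCore_eq (i + 1) i [] (Nat.lt_succ_self i)]
    simp
  rw [hs]
  show List.map _ (PySem.List.pyRepeat ['0'] (a - ((Dch i).length : Int)) ++ Dch i) = _
  rw [PySem.List.pyRepeat_singleton, List.map_append, Dch_map i, List.map_replicate]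
  unfold repW
  rw [List.reverse_append, List.reverse_replicate]
  have hlen := Dch_length i
  have hpos := Lb'_length_pos i
  rw [show ((PySem.Int.ofChars? ['0']).getD 0 : Int) = 0 from rfl, hlen]
  congr 2
  omega

theorem foldA (a : Int) : ∀ (l : List Int) (c : Int) (acc : List (List Int)),
    (l.foldl (fun (st : Int × List (List Int)) _ => (st.1 + 1, st.2 ++ [rowA a st.1])) (c, acc)).2
      = acc ++ (List.range l.length).map (fun (i : Nat) => rowA a (c + (i : Int))) := by
  intro l
  induction l with
  | nil => simp
  | cons x l ih =>
    intro c acc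
    simp only [List.foldl_cons, List.length_cons, List.range_succ_eq_map]
    rw [ih (c + 1) (acc ++ [rowA a c])]
    rw [List.append_assoc]
    simp only [List.singleton_append]
    congr 1
    simp only [List.map_cons, List.map_map]
    congr 1
    · norm_num
    · apply List.map_congr_left
      intro i _
      simp only [Function.comp_apply]
      congr 1
      push_cast
      ring

theorem foldB : ∀ (l : List Nat) (w c : Nat) (acc : List (List Int)),
    (l.foldl (fun (st : List Int × List (List Int)) _ => (incRow st.1, st.2 ++ [st.1]))
        (repW w c, acc)).2
      = acc ++ (List.range l.length).map (fun i => repW w (c + i)) := by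
  intro l
  induction l with
  | nil => simp
  | cons x l ih =>
    intro w c acc
    simp only [List.foldl_cons, List.length_cons, List.range_succ_eq_map]
    rw [incRow_rep w c, ih w (c + 1) (acc ++ [repW w c])]
    rw [List.append_assoc]
    simp only [List.singleton_append]
    congr 1
    simp only [List.map_cons, List.map_map]
    rw [Nat.add_zero]
    congr 1
    apply List.map_congr_left
    intro i _
    simp only [Function.comp_apply]
    congr 1
    omega

-- ===== VERDICT (by name: the statement is the Claim_ definition above) =====
theorem truth_list_spec : Claim_equal_truth_list := by
  intro a _
  unfold Spec_truth_list truth_list truth_list_alt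
  by_cases h1 : a = 1
  · simp [h1]
  · simp only [h1, if_false]
    have hw : 1 ≤ (max a 1).toNat := by omega
    rw [show List.replicate (max a 1).toNat (0 : Int) = repW (max a 1).toNat 0
        from (rep_zero _ hw).symm]
    rw [foldA a, foldB]
    simp only [List.nil_append, PySem.List.length_pyRange_one, List.length_range]
    rw [show a ^ 2 - 1 - 0 = a * a - 1 by ring]
    apply List.map_congr_left
    intro i hi
    simp only [Int.zero_add, Nat.zero_add, zero_add]
    exact rowA_eq a i
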